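-- pv_equiv track=rewrite | github.com/pohaoc2/PixCell | tests/test_fig_combinatorial_grammar.py | _make_signature_rows
-- ===== SOURCE A (Python) =====
-- def _make_signature_rows(anchors_to_n_conditions: dict[str, int]) -> list[dict[str, str]]:
--     rows: list[dict[str, str]] = []
--     states = ("prolif", "nonprolif", "dead")
--     levels = ("low", "mid", "high")
--     for anchor, n_conds in anchors_to_n_conditions.items():
--         i = 0
--         for state in states:
--             for oxygen in levels:
--                 for glucose in levels:
--                     if i >= n_conds:
--                         break
--                     rows.append(
--                         {
--                             "anchor_id": anchor,
--                             "cell_state": state,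
--                             "oxygen_label": oxygen,
--                             "glucose_label": glucose,
--                             "mean_cell_size": str(10.0 + i + (0 if anchor == "a0" else 5.0)),
--                             "nuclear_density": str(0.1 * i),
--                             "nucleus_area_median": str(20.0 + i),
--                             "nucleus_area_iqr": str(2.0 + i),
--                             "hematoxylin_burden": "0.5",
--                             "hematoxylin_ratio": "0.5",
--                             "eosin_ratio": "0.5",
--                             "glcm_contrast": "1.0",
--                             "glcm_homogeneity": "0.8",
--                         }
--                     )
--                     i += 1
--     return rows
-- ===== SOURCE B (Python) =====
-- def _make_signature_rows(anchors_to_n_conditions: dict[str, int]) -> list[dict[str, str]]: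
--     states = ("prolif", "nonprolif", "dead")
--     levels = ("low", "mid", "high")
--     tail = {
--         "hematoxylin_burden": "0.5",
--         "hematoxylin_ratio": "0.5",
--         "eosin_ratio": "0.5",
--         "glcm_contrast": "1.0",
--         "glcm_homogeneity": "0.8",
--     }
--
--     def row(anchor: str, i: int) -> dict[str, str]:
--         return {
--             "anchor_id": anchor,
--             "cell_state": states[i // 9],
--             "oxygen_label": levels[i // 3 % 3],
--             "glucose_label": levels[i % 3],
--             "mean_cell_size": str(10.0 + i + (0 if anchor == "a0" else 5.0)),
--             "nuclear_density": str(0.1 * i),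
--             "nucleus_area_median": str(20.0 + i),
--             "nucleus_area_iqr": str(2.0 + i),
--             **tail,
--         }
--
--     return [
--         row(anchor, i)
--         for anchor, n_conds in anchors_to_n_conditions.items()
--         for i in range(min(n_conds, 27))
--     ]
-- ===== Notes on version B (the rewrite author's own statement) =====
-- stated objective: simpler
-- what changed: Replaces A's accumulator list, manual counter and triple nested loops with inner break by a flat comprehension over min(n_conds, 27) indices per anchor, decoding the three labels arithmetically from the index and merging a constant tail dict into each row.
import Mathlib
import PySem

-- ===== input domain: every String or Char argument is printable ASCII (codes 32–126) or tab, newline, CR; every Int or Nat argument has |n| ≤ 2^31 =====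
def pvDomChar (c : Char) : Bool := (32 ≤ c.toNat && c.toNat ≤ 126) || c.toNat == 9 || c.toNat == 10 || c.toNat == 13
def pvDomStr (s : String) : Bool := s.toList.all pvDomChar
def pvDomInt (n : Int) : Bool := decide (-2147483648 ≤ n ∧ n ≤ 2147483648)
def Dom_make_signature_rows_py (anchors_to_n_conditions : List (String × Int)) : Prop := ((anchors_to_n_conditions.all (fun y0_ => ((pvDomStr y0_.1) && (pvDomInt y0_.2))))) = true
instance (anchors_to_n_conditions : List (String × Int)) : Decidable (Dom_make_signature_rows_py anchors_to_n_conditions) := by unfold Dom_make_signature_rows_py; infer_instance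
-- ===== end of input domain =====

-- B replaces A's accumulator list, manual counter and triple nested loops with an inner
-- break by one flat comprehension over min(n_conds, 27) indices per anchor, decoding the
-- three labels arithmetically from the index and merging a constant tail dict (objective: simpler).

-- ===== PORT A =====
-- str(0.1 * i) for 0 ≤ i ≤ 26: exact CPython float-repr table (only these i are ever used).
def aTenth (i : Int) : String :=
  (PySem.List.pyGetD
    ["0.0", "0.1", "0.2", "0.30000000000000004", "0.4", "0.5", "0.6000000000000001",
     "0.7000000000000001", "0.8", "0.9", "1.0", "1.1", "1.2000000000000002", "1.3",
     "1.4000000000000001", "1.5", "1.6", "1.7000000000000002", "1.8", "1.9000000000000001",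
     "2.0", "2.1", "2.2", "2.3000000000000003", "2.4000000000000004", "2.5", "2.6"] i "")

-- str(x + 0.0) for an integer-valued float x in A's range: exact ("<x>.0").
def aFloat (x : Int) : String := PySem.Int.toStr x ++ ".0"

-- the dict literal appended by A's innermost loop body
def aRow (anchor state oxygen glucose : String) (i : Int) : List (String × String) :=
  [("anchor_id", anchor),
   ("cell_state", state),
   ("oxygen_label", oxygen),
   ("glucose_label", glucose),
   ("mean_cell_size", aFloat (10 + i + (if anchor == "a0" then 0 else 5))),
   ("nuclear_density", aTenth i),
   ("nucleus_area_median", aFloat (20 + i)),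
   ("nucleus_area_iqr", aFloat (2 + i)),
   ("hematoxylin_burden", "0.5"),
   ("hematoxylin_ratio", "0.5"),
   ("eosin_ratio", "0.5"),
   ("glcm_contrast", "1.0"),
   ("glcm_homogeneity", "0.8")]

def aStates : List String := ["prolif", "nonprolif", "dead"]
def aLevels : List String := ["low", "mid", "high"]

-- innermost 'for glucose in levels: if i >= n_conds: break; rows.append(...); i += 1'
def gluLoopA (anchor : String) (n : Int) (state oxygen : String) :
    List String → List (List (String × String)) → Int →
    (List (List (String × String)) × Int)
  | [], rows, i => (rows, i)
  | g :: gs, rows, i =>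
      if i ≥ n then (rows, i)
      else gluLoopA anchor n state oxygen gs (rows ++ [aRow anchor state oxygen g i]) (i + 1)

def make_signature_rows_py (anchors_to_n_conditions : List (String × Int)) : List (List (String × String)) :=
  (anchors_to_n_conditions.foldl (fun rows p =>
    (aStates.foldl (fun acc state =>
      aLevels.foldl (fun acc2 oxygen =>
        gluLoopA p.1 p.2 state oxygen aLevels acc2.1 acc2.2) acc)
      (rows, (0 : Int))).1)
  [])

-- ===== PORT B =====
def bStates : List String := ["prolif", "nonprolif", "dead"]
def bLevels : List String := ["low", "mid", "high"]

-- the constant 'tail' dict merged into every row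
def bTail : List (String × String) :=
  [("hematoxylin_burden", "0.5"),
   ("hematoxylin_ratio", "0.5"),
   ("eosin_ratio", "0.5"),
   ("glcm_contrast", "1.0"),
   ("glcm_homogeneity", "0.8")]

-- str(0.1 * i) for 0 ≤ i ≤ 26, hand-ported exactly: usually "<i div 10>.<i mod 10>",
-- except the nine indices where CPython's binary-float repr carries rounding artifacts.
def bTenthArtifacts : List (Int × String) :=
  [(3, "0.30000000000000004"), (6, "0.6000000000000001"), (7, "0.7000000000000001"),
   (12, "1.2000000000000002"), (14, "1.4000000000000001"), (17, "1.7000000000000002"),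
   (19, "1.9000000000000001"), (23, "2.3000000000000003"), (24, "2.4000000000000004")]

def bTenth (i : Int) : String :=
  match bTenthArtifacts.find? (fun p => p.1 == i) with
  | some p => p.2
  | none => PySem.Int.toStr (PySem.Int.floordiv i 10) ++ "." ++ PySem.Int.toStr (PySem.Int.mod i 10)

-- str(x + 0.0) for an integer-valued float x in B's range: exact ("<x>.0").
def bFloat (x : Int) : String := PySem.Int.toStr x ++ ".0"

-- B's row(anchor, i): 0 ≤ i < 27, so every tuple index is in range and the
-- getD default is never used (Python tuple indexing cannot raise here).
def bRow (anchor : String) (i : Int) : List (String × String) :=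
  [("anchor_id", anchor),
   ("cell_state", PySem.List.pyGetD bStates (PySem.Int.floordiv i 9) ""),
   ("oxygen_label", PySem.List.pyGetD bLevels (PySem.Int.mod (PySem.Int.floordiv i 3) 3) ""),
   ("glucose_label", PySem.List.pyGetD bLevels (PySem.Int.mod i 3) ""),
   ("mean_cell_size", bFloat (10 + i + (if anchor == "a0" then 0 else 5))),
   ("nuclear_density", bTenth i),
   ("nucleus_area_median", bFloat (20 + i)),
   ("nucleus_area_iqr", bFloat (2 + i))] ++ bTail

def make_signature_rows_py_alt (anchors_to_n_conditions : List (String × Int)) : List (List (String × String)) :=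
  anchors_to_n_conditions.flatMap
    (fun p => (PySem.List.pyRange 0 (min p.2 27) 1).map (bRow p.1))

-- ===== PRECONDITION & SPEC =====
def Spec_make_signature_rows_py (anchors_to_n_conditions : List (String × Int)) (out : List (List (String × String))) : Prop := out = make_signature_rows_py_alt anchors_to_n_conditions
instance (anchors_to_n_conditions : List (String × Int)) (out : List (List (String × String))) : Decidable (Spec_make_signature_rows_py anchors_to_n_conditions out) := by unfold Spec_make_signature_rows_py; infer_instance

-- ===== CLAIM =====
def Claim_equal_make_signature_rows_py : Prop := ∀ (anchors_to_n_conditions : List (String × Int)), Dom_make_signature_rows_py anchors_to_n_conditions → Spec_make_signature_rows_py anchors_to_n_conditions (make_signature_rows_py anchors_to_n_conditions)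

-- ===== LEMMAS AND PROOFS =====

-- proof-side flattened loop: one pass over the 27 (state, oxygen, glucose) triples,
-- with A's sticky 'i >= n' stop (break only skips the rest of a block, i never moves again)
def flatLoop (a : String) (n : Int) :
    List (String × String × String) → List (List (String × String)) → Int →
    (List (List (String × String)) × Int)
  | [], rows, i => (rows, i)
  | t :: ts, rows, i =>
      if i ≥ n then flatLoop a n ts rows i
      else flatLoop a n ts (rows ++ [aRow a t.1 t.2.1 t.2.2 i]) (i + 1)

def decode3 (j : Int) : String × String × String :=
  (PySem.List.pyGetD bStates (PySem.Int.floordiv j 9) "",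
   PySem.List.pyGetD bLevels (PySem.Int.mod (PySem.Int.floordiv j 3) 3) "",
   PySem.List.pyGetD bLevels (PySem.Int.mod j 3) "")

def blk (s o : String) : List (String × String × String) := [(s, o, "low"), (s, o, "mid"), (s, o, "high")]

def T27 : List (String × String × String) :=
  blk "prolif" "low" ++ (blk "prolif" "mid" ++ (blk "prolif" "high" ++
  (blk "nonprolif" "low" ++ (blk "nonprolif" "mid" ++ (blk "nonprolif" "high" ++
  (blk "dead" "low" ++ (blk "dead" "mid" ++ blk "dead" "high")))))))

theorem flatLoop_stop (a : String) (n : Int) (ts : List (String × String × String))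
    (rows : List (List (String × String))) (i : Int) (h : i ≥ n) :
    flatLoop a n ts rows i = (rows, i) := by
  induction ts with
  | nil => rfl
  | cons t ts ih => simp [flatLoop, h, ih]

theorem flatLoop_append (a : String) (n : Int) (ts1 ts2 : List (String × String × String)) :
    ∀ (rows : List (List (String × String))) (i : Int),
    flatLoop a n (ts1 ++ ts2) rows i
      = flatLoop a n ts2 (flatLoop a n ts1 rows i).1 (flatLoop a n ts1 rows i).2 := by
  induction ts1 with
  | nil => intro rows i; rfl
  | cons t ts ih =>
      intro rows i
      by_cases hin : i ≥ n <;> simp [flatLoop, hin, ih]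

theorem glu_flat (a : String) (n : Int) (s o : String) :
    ∀ (gs : List String) (rows : List (List (String × String))) (i : Int),
    flatLoop a n (gs.map (fun g => (s, o, g))) rows i = gluLoopA a n s o gs rows i := by
  intro gs
  induction gs with
  | nil => intro rows i; rfl
  | cons g gs ih =>
      intro rows i
      by_cases hin : i ≥ n
      · simp [gluLoopA, hin, flatLoop_stop a n _ rows i hin]
      · simp [flatLoop, gluLoopA, hin, ih]

theorem block_flat (a : String) (n : Int) (s o : String)
    (rows : List (List (String × String))) (i : Int) :
    flatLoop a n (blk s o) rows i = gluLoopA a n s o aLevels rows i :=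
  glu_flat a n s o aLevels rows i

theorem tenth_agree (i : Int) (h0 : 0 ≤ i) (h27 : i < 27) : aTenth i = bTenth i := by
  interval_cases i <;> decide

theorem flatLoop_run (a : String) (n : Int) :
    ∀ (ts : List (String × String × String)) (i : Int) (rows : List (List (String × String))),
    0 ≤ i → i + ts.length ≤ 27 →
    (∀ k : Nat, k < ts.length → ts.getD k ("", "", "") = decode3 (i + k)) →
    flatLoop a n ts rows i
      = (rows ++ (PySem.List.pyRange i (min n (i + ts.length)) 1).map (bRow a),
         max i (min n (i + ts.length))) := by
  intro ts
  induction ts with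
  | nil =>
      intro i rows _ _ _
      simp only [List.length_nil, Nat.cast_zero, add_zero, flatLoop]
      rw [PySem.List.pyRange_one_eq_nil (by omega)]
      simp
  | cons t ts ih =>
      intro i rows hlo hhi h
      have h0 : t = decode3 i := by simpa using h 0 (by simp)
      by_cases hin : i ≥ n
      · rw [flatLoop, if_pos hin, flatLoop_stop a n ts rows i hin]
        rw [PySem.List.pyRange_one_eq_nil (by simp; omega)]
        simp
        omega
      · have h' : ∀ k : Nat, k < ts.length → ts.getD k ("", "", "") = decode3 ((i + 1) + k) := by
          intro k hk
          have := h (k + 1) (by simpa using Nat.succ_lt_succ hk)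
          simp only [List.getD_cons_succ] at this
          rw [this]
          congr 1
          push_cast
          ring
        have hhi' : (i + 1) + (ts.length : Int) ≤ 27 := by
          simp only [List.length_cons] at hhi; push_cast at hhi ⊢; omega
        rw [flatLoop, if_neg hin, ih (i + 1) _ (by omega) hhi' h']
        have hlen : i + ((ts.length + 1 : Nat) : Int) = (i + 1) + (ts.length : Int) := by
          push_cast; ring
        simp only [List.length_cons, hlen]
        conv_rhs => rw [PySem.List.pyRange_one_cons (by omega)]
        have hr : aRow a t.1 t.2.1 t.2.2 i = bRow a i := by
          rw [h0]
          have : aTenth i = bTenth i :=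
            tenth_agree i hlo (by simp only [List.length_cons] at hhi; push_cast at hhi; omega)
          simp [aRow, bRow, bTail, decode3, aFloat, bFloat, this]
        simp only [List.map_cons, hr, Prod.mk.injEq]
        constructor
        · simp
        · omega

theorem nested_eq_flat (a : String) (n : Int) (rows : List (List (String × String))) (i : Int) :
    aStates.foldl (fun acc state =>
      aLevels.foldl (fun acc2 oxygen =>
        gluLoopA a n state oxygen aLevels acc2.1 acc2.2) acc) (rows, i)
    = flatLoop a n T27 rows i := by
  simp only [T27, flatLoop_append, block_flat, aStates, aLevels, List.foldl]

theorem perAnchor (a : String) (n : Int) (rows : List (List (String × String))) :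
    (aStates.foldl (fun acc state =>
      aLevels.foldl (fun acc2 oxygen =>
        gluLoopA a n state oxygen aLevels acc2.1 acc2.2) acc)
      (rows, (0 : Int))).1
    = rows ++ (PySem.List.pyRange 0 (min n 27) 1).map (bRow a) := by
  rw [nested_eq_flat, flatLoop_run a n T27 0 rows (by decide) (by decide) (by decide)]
  norm_num [T27, blk]

-- ===== VERDICT =====
theorem make_signature_rows_py_spec : Claim_equal_make_signature_rows_py := by
  intro l _
  unfold Spec_make_signature_rows_py make_signature_rows_py make_signature_rows_py_alt
  simp only [perAnchor]
  exact PySem.List.foldl_append_eq_flatMap _ _ _
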